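-- pv_equiv track=rewrite | github.com/szhx/Python | University projects/a03/a03q1.py | check_space
-- ===== SOURCE A (Python) =====
-- def check_space(s, i):
--     if i == -1:
--         return True
--     else:
--         if s[i] == " ":
--             return False
--         else:
--             return check_space(s, i-1)
-- ===== SOURCE B (Python) =====
-- def check_space(s, i):
--     # Membership test on a prefix slice instead of recursive index walk.
--     return " " not in s[:i + 1]
-- ===== Notes on version B (the rewrite author's own statement) =====
-- stated objective: simpler
-- what changed: Replaces the one-character-at-a-time recursion with a single slice + substring membership test (' ' not in s[:i+1]); Pre_ is exactly the inputs where A returns (outside it A raises IndexError; B is total).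
import Mathlib
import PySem

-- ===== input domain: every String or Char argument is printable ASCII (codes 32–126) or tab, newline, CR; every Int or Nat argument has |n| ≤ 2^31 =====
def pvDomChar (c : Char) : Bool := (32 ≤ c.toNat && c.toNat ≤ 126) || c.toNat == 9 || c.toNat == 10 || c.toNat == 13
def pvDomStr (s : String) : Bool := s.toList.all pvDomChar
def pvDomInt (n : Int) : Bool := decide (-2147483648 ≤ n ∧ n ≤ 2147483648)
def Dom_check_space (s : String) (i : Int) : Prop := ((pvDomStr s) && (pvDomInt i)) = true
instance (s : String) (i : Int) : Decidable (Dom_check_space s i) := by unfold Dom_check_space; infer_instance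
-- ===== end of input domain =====

-- B replaces A's character-by-character recursion with a prefix-slice membership test (simpler).
-- Equivalence is on the return value, on exactly the inputs where A returns (Pre_).

-- ===== PORT A =====
-- Literal port of A's recursion; the pyGet? = none branch is Python's IndexError (outside Pre_).
def check_space (s : String) (i : Int) : Bool :=
  if i = -1 then true
  else
    if h : PySem.List.pyGet? s.toList i = none then
      false  -- Python raises IndexError here; excluded by Pre_check_space
    else
      if PySem.List.pyGet? s.toList i = some ' ' then false
      else check_space s (i - 1)
termination_by (i + s.toList.length + 1).toNat
decreasing_by
  have hr : PySem.Raise.InRange s.toList.length i := by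
    by_contra hc
    exact h ((PySem.List.pyGet?_eq_none_iff _ _).mpr hc)
  rcases hr with ⟨h1, -⟩
  omega

-- ===== PORT B =====
-- Port of Source B: " " not in s[:i+1]  (single-character needle, so substring test = char membership)
def check_space_alt (s : String) (i : Int) : Bool :=
  ! ((PySem.List.slice s.toList none (some (i + 1))).contains ' ')

-- ===== PRECONDITION & SPEC =====
-- Pre_ is exactly the inputs where A returns: -1 ≤ i < len(s), or i ≤ -2 with a space among
-- the characters A's negative-index walk visits before falling off the front (s[:i+1]).
def Pre_check_space (s : String) (i : Int) : Prop :=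
  (-1 ≤ i ∧ i < (s.toList.length : Int)) ∨
  (i ≤ -2 ∧ -(s.toList.length : Int) ≤ i ∧
    ' ' ∈ s.toList.take ((s.toList.length : Int) + i + 1).toNat)
instance (s : String) (i : Int) : Decidable (Pre_check_space s i) := by
  unfold Pre_check_space; infer_instance
def pvWitness_check_space : String × Int := ("a b", 2)

def Spec_check_space (s : String) (i : Int) (out : Bool) : Prop := out = check_space_alt s i
instance (s : String) (i : Int) (out : Bool) : Decidable (Spec_check_space s i out) := by
  unfold Spec_check_space; infer_instance

-- ===== CLAIM (what is proved, stated in full; the proofs are below) =====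
def Claim_equal_check_space : Prop :=
  ∀ (s : String) (i : Int), Dom_check_space s i → Pre_check_space s i →
    Spec_check_space s i (check_space s i)

-- ===== LEMMAS AND PROOFS =====

-- Region 1: -1 ≤ i < len.  A scanning indices i..0 equals the prefix membership test.
theorem check_space_take (s : String) (n : Nat) (hn : n ≤ s.toList.length) :
    check_space s ((n : Int) - 1) = ! ((s.toList.take n).contains ' ') := by
  induction n with
  | zero => simp [check_space]
  | succ n ih =>
    have hlt : n < s.toList.length := by omega
    rw [check_space]
    have hne : ¬ ((n + 1 : Nat) : Int) - 1 = -1 := by push_cast; omega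
    have hix : ((n + 1 : Nat) : Int) - 1 = ((n : Nat) : Int) := by push_cast; omega
    have hget : PySem.List.pyGet? s.toList (((n + 1 : Nat) : Int) - 1) = some s.toList[n] := by
      rw [hix, PySem.List.pyGet?_natCast, List.getElem?_eq_getElem hlt]
    have htake : s.toList.take (n + 1) = s.toList.take n ++ [s.toList[n]] := by
      rw [List.take_add_one, List.getElem?_eq_getElem hlt]; rfl
    rw [if_neg hne, dif_neg (by rw [hget]; exact Option.some_ne_none _), hget]
    by_cases hc : s.toList[n] = ' '
    · rw [if_pos (by rw [hc]), htake]
      simp [hc]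
    · have harg : ((n + 1 : Nat) : Int) - 1 - 1 = ((n : Nat) : Int) - 1 := by push_cast; omega
      rw [if_neg (by simp [hc]), harg, ih (by omega), htake]
      have hiff : (' ' ∈ s.toList.take n ++ [s.toList[n]]) ↔ ' ' ∈ s.toList.take n := by
        rw [List.mem_append]
        constructor
        · rintro (h | h)
          · exact h
          · rw [List.mem_singleton] at h; exact absurd h.symm hc
        · exact Or.inl
      rw [List.contains_eq_mem, List.contains_eq_mem, decide_eq_decide.mpr hiff]

-- Region 2: i ≤ -2 with a space in the scanned prefix — A returns false before falling off.
theorem check_space_neg (s : String) (n : Nat) (hn : n < s.toList.length)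
    (hmem : ' ' ∈ s.toList.take n) :
    check_space s ((n : Int) - 1 - s.toList.length) = false := by
  induction n with
  | zero => simp at hmem
  | succ n ih =>
    have hlt : n < s.toList.length := by omega
    rw [check_space]
    have hne : ¬ ((n + 1 : Nat) : Int) - 1 - (s.toList.length : Int) = -1 := by push_cast; omega
    have hidx : ((n + 1 : Nat) : Int) - 1 - (s.toList.length : Int)
        = -(((s.toList.length - n : Nat) : Int)) := by push_cast; omega
    have hget : PySem.List.pyGet? s.toList (((n + 1 : Nat) : Int) - 1 - (s.toList.length : Int))
        = some s.toList[n] := by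
      rw [hidx, PySem.List.pyGet?_neg_natCast s.toList (s.toList.length - n) (by omega) (by omega)]
      have h2 : s.toList.length - (s.toList.length - n) = n := by omega
      rw [h2, List.getElem?_eq_getElem hlt]
    have htake : s.toList.take (n + 1) = s.toList.take n ++ [s.toList[n]] := by
      rw [List.take_add_one, List.getElem?_eq_getElem hlt]; rfl
    rw [if_neg hne, dif_neg (by rw [hget]; exact Option.some_ne_none _), hget]
    by_cases hc : s.toList[n] = ' '
    · rw [if_pos (by rw [hc])]
    · have hmem' : ' ' ∈ s.toList.take n := by
        rw [htake] at hmem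
        rcases List.mem_append.mp hmem with h | h
        · exact h
        · simp at h; exact absurd h.symm hc
      have harg : ((n + 1 : Nat) : Int) - 1 - (s.toList.length : Int) - 1
          = ((n : Nat) : Int) - 1 - (s.toList.length : Int) := by push_cast; omega
      rw [if_neg (by simp [hc]), harg]
      exact ih hlt hmem'

theorem check_space_spec : Claim_equal_check_space := by
  unfold Claim_equal_check_space Spec_check_space check_space_alt
  intro s i _ hpre
  rcases hpre with ⟨h1, h2⟩ | ⟨h1, h2, h3⟩
  · -- -1 ≤ i < len : both are the prefix test on take (i+1)
    have hA := check_space_take s (i + 1).toNat (by omega)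
    have hi : (((i + 1).toNat : Int)) - 1 = i := by omega
    rw [hi] at hA
    have hB : PySem.List.slice s.toList none (some (i + 1))
        = s.toList.take (i + 1).toNat := PySem.List.slice_to s.toList (by omega)
    rw [hA, hB]
  · -- i ≤ -2 with a space in the scanned prefix: both return false
    have hnlt : ((s.toList.length : Int) + i + 1).toNat < s.toList.length := by omega
    have hA := check_space_neg s ((s.toList.length : Int) + i + 1).toNat hnlt h3
    have hi : ((((s.toList.length : Int) + i + 1).toNat : Int)) - 1 - (s.toList.length : Int) = i := by
      omega
    rw [hi] at hA
    have hb : i + 1 = -(((-(i + 1)).toNat : Int)) := by omega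
    have hB : PySem.List.slice s.toList none (some (i + 1))
        = s.toList.take (s.toList.length - (-(i + 1)).toNat) := by
      have h6 := PySem.List.slice_to_neg_natCast s.toList ((-(i + 1)).toNat) (by omega)
      rw [← hb] at h6
      exact h6
    have hlen : s.toList.length - (-(i + 1)).toNat = ((s.toList.length : Int) + i + 1).toNat := by
      have h4 : (((-(i + 1)).toNat : Int)) = -(i + 1) := Int.toNat_of_nonneg (by omega)
      have h5 : ((((s.toList.length : Int) + i + 1).toNat : Int)) = (s.toList.length : Int) + i + 1 :=
        Int.toNat_of_nonneg (by omega)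
      omega
    have hc2 : decide (' ' ∈ s.toList.take ((s.toList.length : Int) + i + 1).toNat) = true :=
      decide_eq_true h3
    rw [hA, hB, hlen, List.contains_eq_mem, hc2]
    rfl
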